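-- pv_equiv track=rewrite | github.com/bwbkwk/hacker-rank | interview-preparation-kit/miscellaneous/Friend Circle Queries (FrozenSet)).py | maxCircle
-- ===== SOURCE A (Python) =====
-- def maxCircle(queries):
--     ans = []
--     circles = set()
--     biggest_circle = -1
--     for query in queries:
--         circle1 = frozenset([query[0]])
--         for circle in circles:
--             if query[0] in circle:
--                  circle1 = circle
--                  break
--         circle2 = frozenset([query[1]])
--         for circle in circles:
--             if query[1] in circle:
--                  circle2 = circle
--                  break
--         circles.discard(circle1)
--         circles.discard(circle2)
--         newSet = circle1.union(circle2)
--         biggest_circle = max(biggest_circle,len(newSet))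
--         ans.append(biggest_circle)
--         circles.add(newSet)
--     return ans
-- ===== SOURCE B (Python) =====
-- def maxCircle(queries):
--     ans = []
--     label = {}    # person -> circle id
--     members = {}  # circle id -> list of its people
--     fresh = 0
--     best = 0
--     for query in queries:
--         u, v = query[0], query[1]
--         if u not in label:
--             label[u] = fresh
--             members[fresh] = [u]
--             fresh += 1
--         if v not in label:
--             label[v] = fresh
--             members[fresh] = [v]
--             fresh += 1
--         lu, lv = label[u], label[v]
--         if lu != lv:
--             if len(members[lu]) < len(members[lv]):
--                 lu, lv = lv, lu
--             for x in members[lv]: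
--                 label[x] = lu
--             members[lu] = members[lu] + members[lv]
--             del members[lv]
--         if len(members[lu]) > best:
--             best = len(members[lu])
--         ans.append(best)
--     return ans
-- ===== Notes on version B (the rewrite author's own statement) =====
-- stated objective: faster
-- what changed: Replaces A's per-query linear scans over a set of frozensets (find u's circle, find v's circle, discard both, rebuild the union) with a weighted quick-find: a dict person->circle-id plus a dict id->member-list, merging by relabelling the smaller circle.
import Mathlib
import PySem

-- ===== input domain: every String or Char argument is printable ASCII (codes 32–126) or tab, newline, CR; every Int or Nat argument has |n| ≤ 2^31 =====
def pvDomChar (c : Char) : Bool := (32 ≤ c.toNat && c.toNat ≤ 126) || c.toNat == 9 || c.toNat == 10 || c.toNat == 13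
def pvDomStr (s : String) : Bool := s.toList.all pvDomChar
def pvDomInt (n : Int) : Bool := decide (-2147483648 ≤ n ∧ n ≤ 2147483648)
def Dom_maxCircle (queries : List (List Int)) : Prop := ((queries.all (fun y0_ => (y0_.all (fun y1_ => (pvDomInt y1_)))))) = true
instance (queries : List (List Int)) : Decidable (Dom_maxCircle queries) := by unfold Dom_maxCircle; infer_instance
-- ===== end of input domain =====

-- B replaces A's per-query scans over a set of frozensets by a weighted quick-find
-- (dict person -> circle id, dict id -> member list, relabel the smaller circle),
-- intended as a faster algorithm for the same exact answers.

-- ===== PORT A =====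
-- A's 'circles' is a Python set of frozensets of ints. A frozenset is represented as a
-- duplicate-free List Int, the outer set as a List of such lists. This representation is
-- exact here: A keeps its circles pairwise disjoint and nonempty, so frozenset equality
-- coincides with equality of the stored representatives, the 'for circle in circles:
-- ... break' scans have at most one possible hit (so the unmodelled set iteration order
-- cannot affect the result), and discard/add never see two set-equal distinct elements.
-- 'for circle in circles: if q in circle: circle1 = circle; break':
def findCircleA (circles : List (List Int)) (x : Int) (dflt : List Int) : List Int :=
  match circles with
  | [] => dflt
  | c :: rest => if x ∈ c then c else findCircleA rest x dflt

def stepA (s : List Int × List (List Int) × Int) (query : List Int) :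
    List Int × List (List Int) × Int :=
  let u := PySem.List.pyGetD query 0 0       -- query[0]  (Pre_ excludes the IndexError case)
  let v := PySem.List.pyGetD query 1 0       -- query[1]
  let c1 := findCircleA s.2.1 u [u]
  let c2 := findCircleA s.2.1 v [v]
  let circles1 := PySem.Set.discard (PySem.Set.discard s.2.1 c1) c2
  let newSet := PySem.Set.union c1 c2
  let biggest := max s.2.2 ((newSet.length : Int))
  (s.1 ++ [biggest], PySem.Set.add circles1 newSet, biggest)

def maxCircle (queries : List (List Int)) : List Int :=
  (queries.foldl stepA ([], [], -1)).1

-- ===== PORT B =====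
structure StB where
  ans : List Int
  label : PySem.Dict Int Int
  members : PySem.Dict Int (List Int)
  fresh : Int
  best : Int

-- python B's 'if x not in label: label[x] = fresh; members[fresh] = [x]; fresh += 1'
def ensureB (label : PySem.Dict Int Int) (members : PySem.Dict Int (List Int))
    (fresh : Int) (x : Int) : PySem.Dict Int Int × PySem.Dict Int (List Int) × Int :=
  if label.contains x then (label, members, fresh)
  else (label.insert x fresh, members.insert fresh [x], fresh + 1)

-- python B's merge block: swap so lu is the larger circle, relabel members[lv],
-- members[lu] = members[lu] + members[lv], del members[lv]; returns the surviving id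
def mergeB (label : PySem.Dict Int Int) (members : PySem.Dict Int (List Int))
    (lu lv : Int) : PySem.Dict Int Int × PySem.Dict Int (List Int) × Int :=
  let mu := members.getD lu []
  let mv := members.getD lv []
  let p := if mu.length < mv.length then (lv, lu, mv, mu) else (lu, lv, mu, mv)
  (p.2.2.2.foldl (fun d x => d.insert x p.1) label,
   (members.insert p.1 (p.2.2.1 ++ p.2.2.2)).erase p.2.1,
   p.1)

def stepB (s : StB) (query : List Int) : StB :=
  let u := PySem.List.pyGetD query 0 0
  let v := PySem.List.pyGetD query 1 0
  let t1 := ensureB s.label s.members s.fresh u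
  let t2 := ensureB t1.1 t1.2.1 t1.2.2 v
  let lu := t2.1.getD u 0
  let lv := t2.1.getD v 0
  let t3 := if lu ≠ lv then mergeB t2.1 t2.2.1 lu lv else (t2.1, t2.2.1, lu)
  let sz : Int := ((t3.2.1.getD t3.2.2 []).length : Int)
  let best := if sz > s.best then sz else s.best
  ⟨s.ans ++ [best], t3.1, t3.2.1, t2.2.2, best⟩

def maxCircle_alt (queries : List (List Int)) : List Int :=
  (queries.foldl stepB ⟨[], PySem.Dict.empty, PySem.Dict.empty, 0, 0⟩).ans

-- ===== PRECONDITION & SPEC =====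
-- Pre_ excludes exactly the queries with fewer than two entries, on which A's
-- query[0]/query[1] raises IndexError.
def Pre_maxCircle (queries : List (List Int)) : Prop := ∀ q ∈ queries, 2 ≤ q.length
instance (queries : List (List Int)) : Decidable (Pre_maxCircle queries) := by
  unfold Pre_maxCircle; infer_instance

def pvWitness_maxCircle : List (List Int) := [[1, 2], [3, 4], [2, 3]]

def Spec_maxCircle (queries : List (List Int)) (out : List Int) : Prop := out = maxCircle_alt queries
instance (queries : List (List Int)) (out : List Int) : Decidable (Spec_maxCircle queries out) := by
  unfold Spec_maxCircle; infer_instance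

-- ===== CLAIM (what is proved, stated in full; the proofs are below) =====
def Claim_equal_maxCircle : Prop := ∀ (queries : List (List Int)), Dom_maxCircle queries → Pre_maxCircle queries → Spec_maxCircle queries (maxCircle queries)

-- ===== LEMMAS AND PROOFS =====

-- the class of x : the first (= unique) circle containing x
def classA (circles : List (List Int)) (x : Int) : Option (List Int) :=
  circles.find? (fun c => decide (x ∈ c))

def classB (label : PySem.Dict Int Int) (members : PySem.Dict Int (List Int)) (x : Int) :
    Option (List Int) :=
  (label.get? x).bind (fun i => members.get? i)

def mOf (c : List Int) : Multiset Int := (c : Multiset Int)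

-- simulation invariant between A's circle list and B's two dicts
structure SimInv (circles : List (List Int)) (label : PySem.Dict Int Int)
    (members : PySem.Dict Int (List Int)) (fresh : Int) : Prop where
  disj : circles.Pairwise (fun c d => ∀ x, x ∈ c → x ∉ d)
  good : ∀ c ∈ circles, c ≠ [] ∧ c.Nodup
  knd : members.keys.Nodup
  l1 : ∀ x i, label.get? x = some i → ∃ m, members.get? i = some m ∧ x ∈ m
  l2 : ∀ i m, members.get? i = some m → ∀ x, x ∈ m → label.get? x = some i
  fr : ∀ i ∈ members.keys, i < fresh
  cls : ∀ x, (classA circles x).map mOf = (classB label members x).map mOf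

-- A's per-query circle update and the new circle's size, in one place
def Acore (circles : List (List Int)) (u v : Int) : List (List Int) × Nat :=
  let c1 := findCircleA circles u [u]
  let c2 := findCircleA circles v [v]
  let newSet := PySem.Set.union c1 c2
  (PySem.Set.add (PySem.Set.discard (PySem.Set.discard circles c1) c2) newSet, newSet.length)

theorem findA_of_forall_not (circles : List (List Int)) (x : Int) (d : List Int)
    (h : ∀ c ∈ circles, x ∉ c) : findCircleA circles x d = d := by
  induction circles with
  | nil => rfl
  | cons c rest ih =>
    simp only [findCircleA]
    rw [if_neg (h c (by simp))]
    exact ih (fun c' hc' => h c' (by simp [hc']))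

theorem same_circle {circles : List (List Int)}
    (hdisj : circles.Pairwise (fun c d => ∀ x, x ∈ c → x ∉ d))
    {c d : List Int} {x : Int} (hc : c ∈ circles) (hd : d ∈ circles)
    (hxc : x ∈ c) (hxd : x ∈ d) : c = d := by
  by_contra hne
  have hsymm : Symmetric (fun (c d : List Int) => ∀ x, x ∈ c → x ∉ d) := by
    intro a b hab x hxb hxa
    exact hab x hxa hxb
  exact (List.Pairwise.forall hsymm hdisj hc hd hne) x hxc hxd

theorem findA_of_mem {circles : List (List Int)}
    (hdisj : circles.Pairwise (fun c d => ∀ x, x ∈ c → x ∉ d))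
    {c : List Int} {x : Int} (hc : c ∈ circles) (hx : x ∈ c) (d : List Int) :
    findCircleA circles x d = c := by
  induction circles with
  | nil => cases hc
  | cons c0 rest ih =>
    simp only [findCircleA]
    rcases List.mem_cons.mp hc with h | h
    · subst h; rw [if_pos hx]
    · by_cases hx0 : x ∈ c0
      · rw [if_pos hx0]
        exact (same_circle hdisj (by simp) (by simp [h]) hx0 hx).symm ▸ rfl
      · rw [if_neg hx0]
        exact ih (List.Pairwise.of_cons hdisj) h

theorem classA_some_iff {circles : List (List Int)}
    (hdisj : circles.Pairwise (fun c d => ∀ x, x ∈ c → x ∉ d)) (x : Int) (c : List Int) :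
    classA circles x = some c ↔ c ∈ circles ∧ x ∈ c := by
  constructor
  · intro h
    exact ⟨List.mem_of_find?_eq_some h, by simpa using List.find?_some h⟩
  · rintro ⟨hc, hx⟩
    have h1 : (circles.find? (fun c => decide (x ∈ c))).isSome := by
      rw [List.find?_isSome]; exact ⟨c, hc, by simpa using hx⟩
    rcases Option.isSome_iff_exists.mp h1 with ⟨c', hc'⟩
    have hc'm : c' ∈ circles := List.mem_of_find?_eq_some hc'
    have hxc' : x ∈ c' := by simpa using List.find?_some hc'
    rw [classA, hc', same_circle hdisj hc'm hc hxc' hx]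

theorem classA_none_iff (circles : List (List Int)) (x : Int) :
    classA circles x = none ↔ ∀ c ∈ circles, x ∉ c := by
  simp [classA, List.find?_eq_none]

theorem classA_congr {l1 l2 : List (List Int)}
    (h1 : l1.Pairwise (fun c d => ∀ x, x ∈ c → x ∉ d))
    (h2 : l2.Pairwise (fun c d => ∀ x, x ∈ c → x ∉ d))
    (hm : ∀ c, c ∈ l1 ↔ c ∈ l2) (x : Int) : classA l1 x = classA l2 x := by
  cases hc : classA l1 x with
  | none =>
    rw [classA_none_iff] at hc
    symm; rw [classA_none_iff]
    intro c hcm; exact hc c ((hm c).mpr hcm)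
  | some c =>
    rw [classA_some_iff h1] at hc
    symm; rw [classA_some_iff h2]
    exact ⟨(hm c).mp hc.1, hc.2⟩

theorem findA_eq_classA (circles : List (List Int)) (x : Int) (d : List Int) :
    findCircleA circles x d = (classA circles x).getD d := by
  induction circles with
  | nil => rfl
  | cons c rest ih =>
    simp only [findCircleA, classA, List.find?_cons]
    by_cases hx : x ∈ c
    · simp [hx]
    · simpa [hx, classA] using ih

-- Set primitives as plain list operations
theorem discard_of_not_mem {α : Type} [BEq α] [LawfulBEq α] {s : List α} {x : α} (h : x ∉ s) :
    PySem.Set.discard s x = s := by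
  apply List.filter_eq_self.mpr
  intro a ha
  simp only [Bool.not_eq_true', beq_eq_false_iff_ne]
  rintro rfl; exact h ha

theorem add_of_not_mem {α : Type} [BEq α] [LawfulBEq α] {s : List α} {x : α} (h : x ∉ s) :
    PySem.Set.add s x = s ++ [x] := by
  simp [PySem.Set.add, PySem.Set.contains, List.contains_eq_mem, h]

theorem mem_discard' {α : Type} [BEq α] [LawfulBEq α] (s : List α) (x y : α) :
    y ∈ PySem.Set.discard s x ↔ y ∈ s ∧ y ≠ x := by
  simp [PySem.Set.discard, List.mem_filter]

theorem union_eq_append {α : Type} [BEq α] [LawfulBEq α] {s t : List α}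
    (hd : ∀ x ∈ t, x ∉ s) (ht : t.Nodup) :
    PySem.Set.union s t = s ++ t := by
  induction t generalizing s with
  | nil => simp [PySem.Set.union, PySem.Set.update]
  | cons a t ih =>
    have ha : PySem.Set.add s a = s ++ [a] := add_of_not_mem (hd a (by simp))
    have hstep : PySem.Set.union s (a :: t) = PySem.Set.union (PySem.Set.add s a) t := rfl
    rw [hstep, ha, ih]
    · simp
    · intro x hx
      simp only [List.mem_append, List.mem_singleton]
      rintro (h | rfl)
      · exact hd x (by simp [hx]) h
      · exact (List.nodup_cons.mp ht).1 hx
    · exact (List.nodup_cons.mp ht).2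

theorem union_eq_left {α : Type} [BEq α] [LawfulBEq α] {s t : List α} (h : ∀ x ∈ t, x ∈ s) :
    PySem.Set.union s t = s := by
  induction t generalizing s with
  | nil => simp [PySem.Set.union, PySem.Set.update]
  | cons a t ih =>
    have ha : PySem.Set.add s a = s := by
      simp [PySem.Set.add, PySem.Set.contains, List.contains_eq_mem, h a (by simp)]
    have hstep : PySem.Set.union s (a :: t) = PySem.Set.union (PySem.Set.add s a) t := rfl
    rw [hstep, ha, ih (fun x hx => h x (by simp [hx]))]

-- Dict facts not in the prelude book
theorem get?_erase (d : PySem.Dict Int (List Int)) (k j : Int) :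
    (d.erase k).get? j = if j = k then none else d.get? j := by
  obtain ⟨items⟩ := d
  simp only [PySem.Dict.erase, PySem.Dict.get?]
  by_cases hjk : j = k
  · subst hjk
    rw [if_pos rfl]
    have hn : List.find? (fun p => p.1 == j) (items.filter (fun p => !(p.1 == j))) = none := by
      rw [List.find?_eq_none]
      intro x hx
      simpa using (List.mem_filter.mp hx).2
    simp [hn]
  · rw [if_neg hjk]
    congr 1
    induction items with
    | nil => rfl
    | cons p rest ih =>
      by_cases hpk : p.1 = k
      · have h1 : (!(p.1 == k)) = false := by simp [hpk]
        have h2 : (p.1 == j) = false := by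
          rw [beq_eq_false_iff_ne, hpk]; exact fun h => hjk h.symm
        simp [List.filter_cons, h1, List.find?_cons, h2, ih]
      · have h1 : (!(p.1 == k)) = true := by simp [hpk]
        by_cases hpj : p.1 = j
        · simp [List.filter_cons, h1, List.find?_cons, hpj, hjk]
        · have h2 : (p.1 == j) = false := by simp [hpj]
          simp [List.filter_cons, h1, List.find?_cons, h2, ih]

theorem keys_erase (d : PySem.Dict Int (List Int)) (k : Int) :
    (d.erase k).keys.Sublist d.keys := by
  obtain ⟨items⟩ := d
  simp only [PySem.Dict.erase, PySem.Dict.keys]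
  exact List.Sublist.map _ (by exact List.filter_sublist)

theorem get?_mem_keys {d : PySem.Dict Int (List Int)} {i : Int} {m : List Int}
    (h : d.get? i = some m) : i ∈ d.keys := by
  simp only [PySem.Dict.get?, Option.map_eq_some_iff] at h
  rcases h with ⟨p, hp, _⟩
  have := List.mem_of_find?_eq_some hp
  have hpk := List.find?_some hp
  simp only [beq_iff_eq] at hpk
  subst hpk
  exact List.mem_map.mpr ⟨p, this, rfl⟩

theorem get?_foldl_insert_const (mb : List Int) (label : PySem.Dict Int Int) (la y : Int) :
    (mb.foldl (fun d x => d.insert x la) label).get? y =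
      if y ∈ mb then some la else label.get? y := by
  induction mb generalizing label with
  | nil => simp
  | cons a t ih =>
    simp only [List.foldl_cons, ih]
    by_cases hyt : y ∈ t
    · simp [hyt]
    · by_cases hya : y = a
      · subst hya; simp [hyt, PySem.Dict.get?_insert_self]
      · have hn : ¬ (y ∈ a :: t) := by simp [hyt, hya]
        simp [hn, hyt, PySem.Dict.get?_insert_of_ne _ _ hya]

-- multiset transfer helpers
theorem mem_of_mOf_eq {a b : List Int} (h : mOf a = mOf b) (x : Int) : x ∈ a ↔ x ∈ b := by
  constructor <;> intro hx
  · have : x ∈ (mOf a) := by simpa [mOf] using hx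
    rw [h] at this; simpa [mOf] using this
  · have : x ∈ (mOf b) := by simpa [mOf] using hx
    rw [← h] at this; simpa [mOf] using this

theorem length_of_mOf_eq {a b : List Int} (h : mOf a = mOf b) : a.length = b.length := by
  have := congrArg Multiset.card h
  simpa [mOf] using this

theorem nodup_of_mOf_eq {a b : List Int} (h : mOf a = mOf b) (ha : a.Nodup) : b.Nodup := by
  have : Multiset.Nodup (mOf a) := by simpa [mOf] using ha
  rw [h] at this; simpa [mOf] using this

theorem findA_append (l1 l2 : List (List Int)) (x : Int) (d : List Int) :
    findCircleA (l1 ++ l2) x d = findCircleA l1 x (findCircleA l2 x d) := by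
  induction l1 with
  | nil => rfl
  | cons c rest ih =>
    simp only [List.cons_append, findCircleA]
    split_ifs <;> simp [ih]

theorem mem_findA_self (circles : List (List Int)) (x : Int) :
    x ∈ findCircleA circles x [x] := by
  induction circles with
  | nil => simp [findCircleA]
  | cons c rest ih =>
    simp only [findCircleA]
    split_ifs with h
    · exact h
    · exact ih

theorem discard_append {α : Type} [BEq α] (l1 l2 : List α) (x : α) :
    PySem.Set.discard (l1 ++ l2) x = PySem.Set.discard l1 x ++ PySem.Set.discard l2 x := by
  simp [PySem.Set.discard, List.filter_append]

theorem discard_eq_filter (s : List (List Int)) (x : List Int) :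
    PySem.Set.discard s x = s.filter (· ≠ x) := by
  apply List.filter_congr
  intro a _
  by_cases h : a = x <;> simp [h]

theorem classB_some {label : PySem.Dict Int Int} {members : PySem.Dict Int (List Int)}
    {x i : Int} {m : List Int} (h1 : label.get? x = some i) (h2 : members.get? i = some m) :
    classB label members x = some m := by
  simp [classB, h1, h2]

theorem classB_none {label : PySem.Dict Int Int} (members : PySem.Dict Int (List Int))
    {x : Int} (h : label.get? x = none) : classB label members x = none := by
  simp [classB, h]

-- from the invariant: an unlabelled person is in no circle
theorem not_in_circle_of_none {circles label members fresh}
    (hinv : SimInv circles label members fresh) {u : Int} (hu : label.get? u = none) :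
    ∀ c ∈ circles, u ∉ c := by
  have h0 := hinv.cls u
  rw [classB_none members hu] at h0
  simp only [Option.map_none, Option.map_eq_none_iff] at h0
  exact (classA_none_iff circles u).mp h0

-- from the invariant: a labelled person's circle, on both sides
theorem circle_of_some {circles label members fresh}
    (hinv : SimInv circles label members fresh) {u lu : Int} (hlu : label.get? u = some lu) :
    ∃ mu cu, members.get? lu = some mu ∧ u ∈ mu ∧ cu ∈ circles ∧ u ∈ cu ∧ mOf cu = mOf mu := by
  obtain ⟨mu, hmu, humu⟩ := hinv.l1 u lu hlu
  have h0 := hinv.cls u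
  rw [classB_some hlu hmu] at h0
  rcases hca : classA circles u with _ | cu
  · rw [hca] at h0; simp at h0
  · rw [hca] at h0
    simp only [Option.map_some, Option.some_inj] at h0
    obtain ⟨hcm, hucu⟩ := (classA_some_iff hinv.disj u cu).mp hca
    exact ⟨mu, cu, hmu, humu, hcm, hucu, h0⟩

-- ========== the three state-transformation lemmas ==========

-- adding an isolated person as a fresh singleton circle
theorem phase_inv {circles label members fresh} (hinv : SimInv circles label members fresh)
    {u : Int} (hu : label.get? u = none) :
    SimInv (circles ++ [[u]]) (label.insert u fresh) (members.insert fresh [u]) (fresh + 1) := by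
  have hnc : ∀ c ∈ circles, u ∉ c := not_in_circle_of_none hinv hu
  have hfreshk : fresh ∉ members.keys := fun hk => lt_irrefl _ (hinv.fr fresh hk)
  have hdisj' : (circles ++ [[u]]).Pairwise (fun c d => ∀ x, x ∈ c → x ∉ d) := by
    rw [List.pairwise_append]
    refine ⟨hinv.disj, by simp, ?_⟩
    intro c hc d hd x hxc
    simp only [List.mem_singleton] at hd
    subst hd
    simp only [List.mem_singleton]
    rintro rfl
    exact hnc c hc hxc
  constructor
  · exact hdisj'
  · intro c hc
    rcases List.mem_append.mp hc with h | h
    · exact hinv.good c h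
    · simp only [List.mem_singleton] at h
      subst h
      exact ⟨by simp, by simp⟩
  · exact PySem.Dict.nodup_keys_insert _ _ _ hinv.knd
  · intro x i hx
    by_cases hxu : x = u
    · subst hxu
      rw [PySem.Dict.get?_insert_self] at hx
      injection hx with hx
      subst hx
      exact ⟨[x], by rw [PySem.Dict.get?_insert_self], by simp⟩
    · rw [PySem.Dict.get?_insert_of_ne _ _ hxu] at hx
      obtain ⟨m, hm, hxm⟩ := hinv.l1 x i hx
      have hif : i ≠ fresh := fun h => hfreshk (h ▸ get?_mem_keys hm)
      exact ⟨m, by rw [PySem.Dict.get?_insert_of_ne _ _ hif]; exact hm, hxm⟩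
  · intro i m him x hxm
    by_cases hif : i = fresh
    · subst hif
      rw [PySem.Dict.get?_insert_self] at him
      injection him with him
      subst him
      simp only [List.mem_singleton] at hxm
      subst hxm
      rw [PySem.Dict.get?_insert_self]
    · rw [PySem.Dict.get?_insert_of_ne _ _ hif] at him
      have hx := hinv.l2 i m him x hxm
      have hxu : x ≠ u := fun h => by rw [h, hu] at hx; cases hx
      rw [PySem.Dict.get?_insert_of_ne _ _ hxu]
      exact hx
  · intro i hi
    rcases (PySem.Dict.mem_keys_insert _ _ _ _).mp hi with h | h
    · subst h; omega
    · have := hinv.fr i h; omega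
  · intro x
    by_cases hxu : x = u
    · subst hxu
      have hA : classA (circles ++ [[x]]) x = some [x] := by
        rw [classA_some_iff hdisj']
        exact ⟨by simp, by simp⟩
      have hB : classB (label.insert x fresh) (members.insert fresh [x]) x = some [x] :=
        classB_some (PySem.Dict.get?_insert_self _ _ _) (PySem.Dict.get?_insert_self _ _ _)
      rw [hA, hB]
    · have hlab : (label.insert u fresh).get? x = label.get? x :=
        PySem.Dict.get?_insert_of_ne _ _ hxu
      have hA : classA (circles ++ [[u]]) x = classA circles x := by
        rcases hca : classA circles x with _ | c
        · rw [classA_none_iff] at hca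
          rw [classA_none_iff]
          intro c hc
          rcases List.mem_append.mp hc with h | h
          · exact hca c h
          · simp only [List.mem_singleton] at h
            subst h
            simp [hxu]
        · rw [classA_some_iff hdisj']
          have := (classA_some_iff hinv.disj x c).mp hca
          exact ⟨List.mem_append_left _ this.1, this.2⟩
      rw [hA]
      rcases hlx : label.get? x with _ | i
      · have hB : classB (label.insert u fresh) (members.insert fresh [u]) x = none :=
          classB_none _ (by rw [hlab]; exact hlx)
        rw [hB, hinv.cls x, classB_none _ hlx]
      · obtain ⟨m, hm, _⟩ := hinv.l1 x i hlx
        have hif : i ≠ fresh := fun h => hfreshk (h ▸ get?_mem_keys hm)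
        have hB : classB (label.insert u fresh) (members.insert fresh [u]) x = some m := by
          refine classB_some (i := i) ?_ ?_
          · rw [hlab]; exact hlx
          · rw [PySem.Dict.get?_insert_of_ne _ _ hif]; exact hm
        rw [hB, hinv.cls x, classB_some hlx hm]

-- A's step does not change if an isolated person's singleton is pre-inserted
theorem absorb_u {circles : List (List Int)} {u : Int} (h : ∀ c ∈ circles, u ∉ c) (v : Int) :
    Acore (circles ++ [[u]]) u v = Acore circles u v := by
  have hnu : [u] ∉ circles := fun hc => h _ hc (by simp)
  have hc1 : findCircleA circles u [u] = [u] := findA_of_forall_not _ _ _ h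
  have hsing : findCircleA [[u]] u [u] = [u] := by simp [findCircleA]
  have hc1' : findCircleA (circles ++ [[u]]) u [u] = [u] := by
    rw [findA_append, hsing, hc1]
  have hc2' : findCircleA (circles ++ [[u]]) v [v] = findCircleA circles v [v] := by
    rw [findA_append]
    by_cases hvu : v = u
    · subst hvu
      simp only [findCircleA]
      rw [if_pos (by simp)]
    · simp only [findCircleA]
      rw [if_neg (by simp [hvu])]
  have hdu : PySem.Set.discard (circles ++ [[u]]) [u] = circles := by
    rw [discard_append, discard_of_not_mem hnu]
    simp [PySem.Set.discard]
  simp only [Acore, hc1, hc1', hc2', hdu, discard_of_not_mem hnu]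

theorem absorb_v {circles : List (List Int)} {v : Int} (h : ∀ c ∈ circles, v ∉ c) (u : Int) :
    Acore (circles ++ [[v]]) u v = Acore circles u v := by
  by_cases huv : u = v
  · subst huv; exact absorb_u h u
  have hnv : [v] ∉ circles := fun hc => h _ hc (by simp)
  have hc2 : findCircleA circles v [v] = [v] := findA_of_forall_not _ _ _ h
  have hc2' : findCircleA (circles ++ [[v]]) v [v] = [v] := by
    rw [findA_append]
    simp only [findCircleA]
    rw [if_pos (by simp), hc2]
  have hc1' : findCircleA (circles ++ [[v]]) u [u] = findCircleA circles u [u] := by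
    rw [findA_append]
    simp only [findCircleA]
    rw [if_neg (by simp [huv])]
  have hvne : [v] ≠ findCircleA circles u [u] := by
    intro he
    rcases hca : classA circles u with _ | c
    · rw [findA_eq_classA, hca] at he
      simp at he
      exact huv he.symm
    · rw [findA_eq_classA, hca] at he
      simp only [Option.getD_some] at he
      have hcm := List.mem_of_find?_eq_some hca
      exact h c hcm (he ▸ (by simp : v ∈ [v]))
  have hd1 : PySem.Set.discard (circles ++ [[v]]) (findCircleA circles u [u]) =
      PySem.Set.discard circles (findCircleA circles u [u]) ++ [[v]] := by
    rw [discard_append]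
    congr 1
    have hb : ([v] == findCircleA circles u [u]) = false := by
      simp [hvne]
    simp [PySem.Set.discard, List.filter, hb]
  have hnv2 : [v] ∉ PySem.Set.discard circles (findCircleA circles u [u]) := by
    intro hm
    exact hnv ((mem_discard' _ _ _).mp hm).1
  simp only [Acore, hc1', hc2', hc2, hd1, discard_append]
  rw [discard_of_not_mem hnv2]
  simp [PySem.Set.discard]

-- merging two distinct circles
theorem mergeInv {circles label members fresh} (hinv : SimInv circles label members fresh)
    {la lb : Int} {ma mb : List Int}
    (hma : members.get? la = some ma) (hmb : members.get? lb = some mb) (hab : la ≠ lb)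
    {ca cb : List Int} (hca : ca ∈ circles) (hcb : cb ∈ circles)
    (hma' : mOf ca = mOf ma) (hmb' : mOf cb = mOf mb) (hcab : ca ≠ cb)
    {w : List Int} (hw : mOf w = mOf ma + mOf mb) :
    SimInv ((circles.filter (· ≠ ca)).filter (· ≠ cb) ++ [w])
      (mb.foldl (fun d x => d.insert x la) label)
      ((members.insert la (ma ++ mb)).erase lb) fresh := by
  have hsymm : Symmetric (fun (c d : List Int) => ∀ x, x ∈ c → x ∉ d) := by
    intro a b hab' x hxb hxa
    exact hab' x hxa hxb
  have hAB : ∀ x, x ∈ ca → x ∉ cb := List.Pairwise.forall hsymm hinv.disj hca hcb hcab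
  have hmemA : ∀ x, x ∈ ca ↔ x ∈ ma := mem_of_mOf_eq hma'
  have hmemB : ∀ x, x ∈ cb ↔ x ∈ mb := mem_of_mOf_eq hmb'
  have hdisjm : ∀ x, x ∈ ma → x ∉ mb := fun x hx hxb =>
    hAB x ((hmemA x).mpr hx) ((hmemB x).mpr hxb)
  have hmemW : ∀ x, x ∈ w ↔ x ∈ ma ∨ x ∈ mb := by
    intro x
    have h1 : (x ∈ w) ↔ x ∈ mOf w := by simp [mOf]
    rw [h1, hw, Multiset.mem_add]
    simp [mOf]
  have hmw : mOf w = mOf (ma ++ mb) := by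
    rw [hw]; simp [mOf]
  have hwnodup : w.Nodup := by
    apply nodup_of_mOf_eq hmw.symm
    rw [List.nodup_append]
    exact ⟨nodup_of_mOf_eq hma' (hinv.good ca hca).2,
      nodup_of_mOf_eq hmb' (hinv.good cb hcb).2,
      fun x hx b hb he => hdisjm x hx (he ▸ hb)⟩
  have hwne : w ≠ [] := by
    obtain ⟨x0, hx0⟩ := List.exists_mem_of_ne_nil ca (hinv.good ca hca).1
    have : x0 ∈ w := (hmemW x0).mpr (Or.inl ((hmemA x0).mp hx0))
    exact List.ne_nil_of_mem this
  have hlab' : ∀ y, (mb.foldl (fun d x => d.insert x la) label).get? y =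
      if y ∈ mb then some la else label.get? y := fun y => get?_foldl_insert_const mb label la y
  have hget' : ∀ j, ((members.insert la (ma ++ mb)).erase lb).get? j =
      if j = lb then none else if j = la then some (ma ++ mb) else members.get? j := by
    intro j
    rw [get?_erase, PySem.Dict.get?_insert]
  have hmemC : ∀ c, c ∈ (circles.filter (· ≠ ca)).filter (· ≠ cb) ++ [w] ↔
      ((c ∈ circles ∧ c ≠ ca ∧ c ≠ cb) ∨ c = w) := by
    intro c
    simp only [List.mem_append, List.mem_filter, List.mem_singleton, decide_eq_true_eq]
    tauto
  have hdisj' : ((circles.filter (· ≠ ca)).filter (· ≠ cb) ++ [w]).Pairwise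
      (fun c d => ∀ x, x ∈ c → x ∉ d) := by
    rw [List.pairwise_append]
    have hss : ((circles.filter (· ≠ ca)).filter (· ≠ cb)).Sublist circles :=
      List.Sublist.trans (by exact List.filter_sublist) (by exact List.filter_sublist)
    refine ⟨hinv.disj.sublist hss, by simp, ?_⟩
    intro c hc d hd x hxc
    simp only [List.mem_singleton] at hd
    subst hd
    obtain ⟨hc1, hccb⟩ := List.mem_filter.mp hc
    obtain ⟨hcm, hcca⟩ := List.mem_filter.mp hc1
    simp only [decide_eq_true_eq] at hcca hccb
    intro hxw
    rcases (hmemW x).mp hxw with hxa | hxb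
    · exact hcca (same_circle hinv.disj hcm hca hxc ((hmemA x).mpr hxa))
    · exact hccb (same_circle hinv.disj hcm hcb hxc ((hmemB x).mpr hxb))
  constructor
  · exact hdisj'
  · intro c hc
    rcases (hmemC c).mp hc with h | h
    · exact hinv.good c h.1
    · subst h; exact ⟨hwne, hwnodup⟩
  · exact List.Nodup.sublist (keys_erase _ _) (PySem.Dict.nodup_keys_insert _ _ _ hinv.knd)
  · intro x i hx
    rw [hlab'] at hx
    by_cases hxmb : x ∈ mb
    · rw [if_pos hxmb] at hx
      injection hx with hx
      subst hx
      exact ⟨ma ++ mb, by rw [hget']; simp [hab], by simp [hxmb]⟩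
    · rw [if_neg hxmb] at hx
      obtain ⟨m, hm, hxm⟩ := hinv.l1 x i hx
      have hib : i ≠ lb := by
        rintro rfl
        rw [hmb] at hm
        injection hm with hm
        exact hxmb (hm ▸ hxm)
      by_cases hia : i = la
      · subst hia
        rw [hma] at hm
        injection hm with hm
        subst hm
        exact ⟨ma ++ mb, by rw [hget']; simp [hab], by simp [hxm]⟩
      · exact ⟨m, by rw [hget']; simp [hib, hia, hm], hxm⟩
  · intro i m him x hxm
    rw [hget'] at him
    by_cases hib : i = lb
    · simp [hib] at him
    by_cases hia : i = la
    · rw [if_neg hib, if_pos hia] at him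
      injection him with him
      subst him
      rw [hia]
      rcases List.mem_append.mp hxm with hxa | hxb
      · have hxmb : x ∉ mb := hdisjm x hxa
        rw [hlab', if_neg hxmb]
        exact hinv.l2 la ma hma x hxa
      · rw [hlab', if_pos hxb]
    · rw [if_neg hib, if_neg hia] at him
      have hx := hinv.l2 i m him x hxm
      have hxmb : x ∉ mb := by
        intro hxb
        have h2 := hinv.l2 lb mb hmb x hxb
        rw [hx] at h2
        injection h2 with h2
        exact hib h2
      rw [hlab', if_neg hxmb]
      exact hx
  · intro i hi
    have hi2 : i ∈ (members.insert la (ma ++ mb)).keys := (keys_erase _ _).subset hi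
    rcases (PySem.Dict.mem_keys_insert _ _ _ _).mp hi2 with h | h
    · rw [h]; exact hinv.fr la (get?_mem_keys hma)
    · exact hinv.fr i h
  · intro x
    by_cases hxw : x ∈ ma ∨ x ∈ mb
    · have hxw' : x ∈ w := (hmemW x).mpr hxw
      have hA : classA ((circles.filter (· ≠ ca)).filter (· ≠ cb) ++ [w]) x = some w :=
        (classA_some_iff hdisj' x w).mpr ⟨(hmemC w).mpr (Or.inr rfl), hxw'⟩
      have hB : classB (mb.foldl (fun d x => d.insert x la) label)
          ((members.insert la (ma ++ mb)).erase lb) x = some (ma ++ mb) := by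
        rcases hxw with hxa | hxb
        · have hxmb : x ∉ mb := hdisjm x hxa
          refine classB_some (i := la) ?_ ?_
          · rw [hlab', if_neg hxmb]
            exact hinv.l2 la ma hma x hxa
          · rw [hget']; simp [hab]
        · refine classB_some (i := la) ?_ ?_
          · rw [hlab', if_pos hxb]
          · rw [hget']; simp [hab]
      rw [hA, hB]
      simp only [Option.map_some, Option.some_inj]
      exact hmw
    · obtain ⟨hxa, hxb⟩ := not_or.mp hxw
      have hxca : x ∉ ca := fun h => hxa ((hmemA x).mp h)
      have hxcb : x ∉ cb := fun h => hxb ((hmemB x).mp h)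
      have hxw' : x ∉ w := fun h => by
        rcases (hmemW x).mp h with h' | h'
        · exact hxa h'
        · exact hxb h'
      rcases hlx : label.get? x with _ | i
      · have hA0 : classA circles x = none := by
          have hcls := hinv.cls x
          rw [classB_none _ hlx] at hcls
          simpa using hcls
        have hA : classA ((circles.filter (· ≠ ca)).filter (· ≠ cb) ++ [w]) x = none := by
          rw [classA_none_iff]
          intro c hc
          rcases (hmemC c).mp hc with h | h
          · exact (classA_none_iff circles x).mp hA0 c h.1
          · subst h; exact hxw'
        have hB : classB (mb.foldl (fun d x => d.insert x la) label)
            ((members.insert la (ma ++ mb)).erase lb) x = none :=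
          classB_none _ (by rw [hlab', if_neg hxb]; exact hlx)
        rw [hA, hB]
      · obtain ⟨m, hm, hxm⟩ := hinv.l1 x i hlx
        have hib : i ≠ lb := by
          rintro rfl
          rw [hmb] at hm
          injection hm with hm
          exact hxb (hm ▸ hxm)
        have hia : i ≠ la := by
          rintro rfl
          rw [hma] at hm
          injection hm with hm
          exact hxa (hm ▸ hxm)
        have hB : classB (mb.foldl (fun d x => d.insert x la) label)
            ((members.insert la (ma ++ mb)).erase lb) x = some m :=
          classB_some (i := i) (by rw [hlab', if_neg hxb]; exact hlx)
            (by rw [hget']; simp [hib, hia, hm])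
        have hcls := hinv.cls x
        rw [classB_some hlx hm] at hcls
        rcases hca0 : classA circles x with _ | c
        · rw [hca0] at hcls; simp at hcls
        · rw [hca0] at hcls
          simp only [Option.map_some, Option.some_inj] at hcls
          obtain ⟨hcm, hxc⟩ := (classA_some_iff hinv.disj x c).mp hca0
          have hcca : c ≠ ca := fun h => hxca (h ▸ hxc)
          have hccb : c ≠ cb := fun h => hxcb (h ▸ hxc)
          have hA : classA ((circles.filter (· ≠ ca)).filter (· ≠ cb) ++ [w]) x = some c :=
            (classA_some_iff hdisj' x c).mpr ⟨(hmemC c).mpr (Or.inl ⟨hcm, hcca, hccb⟩), hxc⟩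
          rw [hA, hB]
          simp only [Option.map_some, Option.some_inj]
          exact hcls

-- the same-circle case of one query
theorem core_same {circles label members fresh} (hinv : SimInv circles label members fresh)
    {u v lu : Int} (hlu : label.get? u = some lu) (hlv : label.get? v = some lu) :
    (Acore circles u v).2 = (members.getD lu []).length ∧
      SimInv (Acore circles u v).1 label members fresh := by
  obtain ⟨mu, cu, hmu, humu, hcum, hucu, hmOf⟩ := circle_of_some hinv hlu
  obtain ⟨mv, cv, hmv, hvmv, hcvm, hvcv, hmOf'⟩ := circle_of_some hinv hlv
  have hmveq : mv = mu := by rw [hmu] at hmv; injection hmv.symm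
  rw [hmveq] at hvmv hmOf'
  have hcveq : cv = cu := by
    have hvu : v ∈ cu := (mem_of_mOf_eq hmOf v).mpr hvmv
    exact same_circle hinv.disj hcvm hcum hvcv hvu
  rw [hcveq] at hcvm hvcv hmOf' 
  have hc1 : findCircleA circles u [u] = cu := findA_of_mem hinv.disj hcum hucu _
  have hc2 : findCircleA circles v [v] = cu := findA_of_mem hinv.disj hcum hvcv _
  have hcu_nd := hinv.good cu hcum
  have hnm : cu ∉ PySem.Set.discard circles cu := fun hm => ((mem_discard' _ _ _).mp hm).2 rfl
  have hAcore : Acore circles u v = (PySem.Set.discard circles cu ++ [cu], cu.length) := by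
    simp only [Acore, hc1, hc2]
    rw [discard_of_not_mem hnm, union_eq_left (fun x hx => hx), add_of_not_mem hnm]
  rw [hAcore]
  constructor
  · show cu.length = (members.getD lu []).length
    rw [PySem.Dict.getD_eq_get?_getD, hmu]
    exact length_of_mOf_eq hmOf
  have hdisj' : (PySem.Set.discard circles cu ++ [cu]).Pairwise
      (fun c d => ∀ x, x ∈ c → x ∉ d) := by
    rw [List.pairwise_append]
    refine ⟨?_, by simp, ?_⟩
    · rw [discard_eq_filter]
      exact hinv.disj.sublist (by exact List.filter_sublist)
    · intro c hc d hd x hxc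
      simp only [List.mem_singleton] at hd
      subst hd
      obtain ⟨hcm, hcne⟩ := (mem_discard' _ _ _).mp hc
      intro hxd
      exact hcne (same_circle hinv.disj hcm hcum hxc hxd)
  have hmemiff : ∀ c, c ∈ PySem.Set.discard circles cu ++ [cu] ↔ c ∈ circles := by
    intro c
    constructor
    · intro hc
      rcases List.mem_append.mp hc with h | h
      · exact ((mem_discard' _ _ _).mp h).1
      · simp only [List.mem_singleton] at h; subst h; exact hcum
    · intro hc
      by_cases hccu : c = cu
      · subst hccu; exact List.mem_append_right _ (by simp)
      · exact List.mem_append_left _ ((mem_discard' _ _ _).mpr ⟨hc, hccu⟩)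
  constructor
  · exact hdisj'
  · intro c hc; exact hinv.good c ((hmemiff c).mp hc)
  · exact hinv.knd
  · exact hinv.l1
  · exact hinv.l2
  · exact hinv.fr
  · intro x
    rw [classA_congr hdisj' hinv.disj hmemiff x]
    exact hinv.cls x

-- the two-circle case of one query
theorem filter_comm' (l : List (List Int)) (ca cb : List Int) :
    (l.filter (· ≠ ca)).filter (· ≠ cb) = (l.filter (· ≠ cb)).filter (· ≠ ca) := by
  simp [List.filter_filter, Bool.and_comm]

theorem mOf_append (a b : List Int) : mOf (a ++ b) = mOf a + mOf b := by
  simp [mOf]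

theorem core_merge {circles label members fresh} (hinv : SimInv circles label members fresh)
    {u v lu lv : Int} (hlu : label.get? u = some lu) (hlv : label.get? v = some lv)
    (hne : lu ≠ lv) :
    (Acore circles u v).2 =
      ((mergeB label members lu lv).2.1.getD (mergeB label members lu lv).2.2 []).length ∧
      SimInv (Acore circles u v).1 (mergeB label members lu lv).1
        (mergeB label members lu lv).2.1 fresh := by
  obtain ⟨mu, cu, hmu, humu, hcum, hucu, hmOfu⟩ := circle_of_some hinv hlu
  obtain ⟨mv, cv, hmv, hvmv, hcvm, hvcv, hmOfv⟩ := circle_of_some hinv hlv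
  have hcucv : cu ≠ cv := by
    intro he
    have hvmu : v ∈ mu := (mem_of_mOf_eq hmOfu v).mp (he ▸ hvcv)
    have h2 := hinv.l2 lu mu hmu v hvmu
    rw [hlv] at h2
    injection h2 with h2
    exact hne h2.symm
  have hsymm : Symmetric (fun (c d : List Int) => ∀ x, x ∈ c → x ∉ d) := by
    intro a b hab' x hxb hxa
    exact hab' x hxa hxb
  have hdisjvc : ∀ x ∈ cv, x ∉ cu :=
    List.Pairwise.forall hsymm hinv.disj hcvm hcum (Ne.symm hcucv)
  have hc1 : findCircleA circles u [u] = cu := findA_of_mem hinv.disj hcum hucu _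
  have hc2 : findCircleA circles v [v] = cv := findA_of_mem hinv.disj hcvm hvcv _
  have hun : PySem.Set.union cu cv = cu ++ cv :=
    union_eq_append hdisjvc (hinv.good cv hcvm).2
  have hAeq : Acore circles u v =
      ((circles.filter (· ≠ cu)).filter (· ≠ cv) ++ [PySem.Set.union cu cv],
        cu.length + cv.length) := by
    simp only [Acore, hc1, hc2]
    have hd1 : PySem.Set.discard circles cu = circles.filter (· ≠ cu) := discard_eq_filter _ _
    have hd2 : PySem.Set.discard (circles.filter (· ≠ cu)) cv =
        (circles.filter (· ≠ cu)).filter (· ≠ cv) := discard_eq_filter _ _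
    have hnm : PySem.Set.union cu cv ∉ (circles.filter (· ≠ cu)).filter (· ≠ cv) := by
      intro hm
      obtain ⟨hm1, hcv'⟩ := List.mem_filter.mp hm
      obtain ⟨hmem, hcu'⟩ := List.mem_filter.mp hm1
      simp only [decide_eq_true_eq] at hcu' hcv'
      have huw : u ∈ PySem.Set.union cu cv := by
        rw [hun]; exact List.mem_append_left _ hucu
      exact hcu' (same_circle hinv.disj hmem hcum huw hucu)
    rw [hd1, hd2, add_of_not_mem hnm]
    have : (PySem.Set.union cu cv).length = cu.length + cv.length := by
      rw [hun, List.length_append]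
    rw [this]
  rw [hAeq]
  have hgu : members.getD lu [] = mu := by
    rw [PySem.Dict.getD_eq_get?_getD, hmu]; rfl
  have hgv : members.getD lv [] = mv := by
    rw [PySem.Dict.getD_eq_get?_getD, hmv]; rfl
  have hlenu : cu.length = mu.length := length_of_mOf_eq hmOfu
  have hlenv : cv.length = mv.length := length_of_mOf_eq hmOfv
  by_cases hswap : (members.getD lu []).length < (members.getD lv []).length
  · have hmB : mergeB label members lu lv =
        (mu.foldl (fun d x => d.insert x lv) label,
          (members.insert lv (mv ++ mu)).erase lu, lv) := by
      have hswap' : mu.length < mv.length := by rwa [hgu, hgv] at hswap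
      simp [mergeB, hgu, hgv, hswap']
    rw [hmB]
    constructor
    · show cu.length + cv.length = _
      simp only
      rw [PySem.Dict.getD_eq_get?_getD, get?_erase, if_neg (Ne.symm hne),
        PySem.Dict.get?_insert_self]
      simp [hlenu, hlenv]
      omega
    · have hw : mOf (PySem.Set.union cu cv) = mOf mv + mOf mu := by
        rw [hun, mOf_append, hmOfu, hmOfv, add_comm]
      have hM := mergeInv hinv hmv hmu (Ne.symm hne) hcvm hcum hmOfv hmOfu
        (Ne.symm hcucv) hw
      rw [filter_comm']
      exact hM
  · have hmB : mergeB label members lu lv =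
        (mv.foldl (fun d x => d.insert x lu) label,
          (members.insert lu (mu ++ mv)).erase lv, lu) := by
      have hswap' : ¬ mu.length < mv.length := by rwa [hgu, hgv] at hswap
      simp [mergeB, hgu, hgv, hswap']
    rw [hmB]
    constructor
    · show cu.length + cv.length = _
      simp only
      rw [PySem.Dict.getD_eq_get?_getD, get?_erase, if_neg hne,
        PySem.Dict.get?_insert_self]
      simp [hlenu, hlenv]
    · have hw : mOf (PySem.Set.union cu cv) = mOf mu + mOf mv := by
        rw [hun, mOf_append, hmOfu, hmOfv]
      exact mergeInv hinv hmu hmv hne hcum hcvm hmOfu hmOfv hcucv hw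

theorem sz_pos (circles : List (List Int)) (u v : Int) : 1 ≤ (Acore circles u v).2 := by
  have hu : u ∈ PySem.Set.union (findCircleA circles u [u]) (findCircleA circles v [v]) := by
    rw [PySem.Set.mem_union]
    exact Or.inl (mem_findA_self circles u)
  simp only [Acore]
  exact List.length_pos_of_mem hu

-- B's post-ensure merge/no-merge selection and whole per-query state update
def selB (label2 : PySem.Dict Int Int) (members2 : PySem.Dict Int (List Int)) (u v : Int) :
    PySem.Dict Int Int × PySem.Dict Int (List Int) × Int :=
  if label2.getD u 0 ≠ label2.getD v 0 then
    mergeB label2 members2 (label2.getD u 0) (label2.getD v 0)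
  else (label2, members2, label2.getD u 0)

def stageB (label : PySem.Dict Int Int) (members : PySem.Dict Int (List Int))
    (fresh u v : Int) :
    PySem.Dict Int Int × PySem.Dict Int (List Int) × Int × Int :=
  let t2 := ensureB (ensureB label members fresh u).1 (ensureB label members fresh u).2.1
    (ensureB label members fresh u).2.2 v
  let t3 := selB t2.1 t2.2.1 u v
  (t3.1, t3.2.1, t2.2.2, ((t3.2.1.getD t3.2.2 []).length : Int))

theorem stepA_eq (ans : List Int) (circles : List (List Int)) (biggest : Int)
    (q : List Int) :
    stepA (ans, circles, biggest) q =
      (ans ++ [max biggest ((Acore circles (PySem.List.pyGetD q 0 0)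
          (PySem.List.pyGetD q 1 0)).2 : Int)],
        (Acore circles (PySem.List.pyGetD q 0 0) (PySem.List.pyGetD q 1 0)).1,
        max biggest ((Acore circles (PySem.List.pyGetD q 0 0)
          (PySem.List.pyGetD q 1 0)).2 : Int)) := rfl

theorem stepB_eq (ans : List Int) (label : PySem.Dict Int Int)
    (members : PySem.Dict Int (List Int)) (fresh best : Int) (q : List Int) :
    stepB ⟨ans, label, members, fresh, best⟩ q =
      ⟨ans ++ [if (stageB label members fresh (PySem.List.pyGetD q 0 0)
            (PySem.List.pyGetD q 1 0)).2.2.2 > best then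
          (stageB label members fresh (PySem.List.pyGetD q 0 0)
            (PySem.List.pyGetD q 1 0)).2.2.2 else best],
        (stageB label members fresh (PySem.List.pyGetD q 0 0) (PySem.List.pyGetD q 1 0)).1,
        (stageB label members fresh (PySem.List.pyGetD q 0 0) (PySem.List.pyGetD q 1 0)).2.1,
        (stageB label members fresh (PySem.List.pyGetD q 0 0) (PySem.List.pyGetD q 1 0)).2.2.1,
        if (stageB label members fresh (PySem.List.pyGetD q 0 0)
            (PySem.List.pyGetD q 1 0)).2.2.2 > best then
          (stageB label members fresh (PySem.List.pyGetD q 0 0)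
            (PySem.List.pyGetD q 1 0)).2.2.2 else best⟩ := rfl

theorem ensureB_pos {label : PySem.Dict Int Int} {members : PySem.Dict Int (List Int)}
    {fresh x : Int} (h : label.contains x = true) :
    ensureB label members fresh x = (label, members, fresh) := by
  simp [ensureB, h]

theorem ensureB_neg {label : PySem.Dict Int Int} {members : PySem.Dict Int (List Int)}
    {fresh x : Int} (h : label.contains x = false) :
    ensureB label members fresh x = (label.insert x fresh, members.insert fresh [x], fresh + 1) := by
  simp [ensureB, h]

theorem get?_none_of_contains_false {label : PySem.Dict Int Int} {x : Int}
    (h : label.contains x = false) : label.get? x = none := by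
  rw [PySem.Dict.contains_eq_isSome_get?] at h
  exact Option.not_isSome_iff_eq_none.mp (by simp [h])

theorem get?_some_of_contains_true {label : PySem.Dict Int Int} {x : Int}
    (h : label.contains x = true) : ∃ i, label.get? x = some i := by
  rw [PySem.Dict.contains_eq_isSome_get?] at h
  exact Option.isSome_iff_exists.mp h

-- after both persons are ensured, the merge/no-merge stage agrees with A
theorem tailB {circles2 : List (List Int)} {label2 : PySem.Dict Int Int}
    {members2 : PySem.Dict Int (List Int)} {fresh2 : Int}
    (hinv2 : SimInv circles2 label2 members2 fresh2)
    {u v lu lv : Int} (hlu : label2.get? u = some lu) (hlv : label2.get? v = some lv) :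
    (Acore circles2 u v).2 =
      ((selB label2 members2 u v).2.1.getD (selB label2 members2 u v).2.2 []).length ∧
      SimInv (Acore circles2 u v).1 (selB label2 members2 u v).1
        (selB label2 members2 u v).2.1 fresh2 := by
  have hgu : label2.getD u 0 = lu := by rw [PySem.Dict.getD_eq_get?_getD, hlu]; rfl
  have hgv : label2.getD v 0 = lv := by rw [PySem.Dict.getD_eq_get?_getD, hlv]; rfl
  by_cases hlulv : lu = lv
  · have hsel : selB label2 members2 u v = (label2, members2, lu) := by
      simp [selB, hgu, hgv, hlulv]
    rw [hsel]
    exact core_same hinv2 hlu (by rw [hlv, hlulv])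
  · have hsel : selB label2 members2 u v = mergeB label2 members2 lu lv := by
      simp [selB, hgu, hgv, hlulv]
    rw [hsel]
    exact core_merge hinv2 hlu hlv hlulv

-- the whole per-query stage, starting from an arbitrary invariant state
theorem stageB_spec {circles : List (List Int)} {label : PySem.Dict Int Int}
    {members : PySem.Dict Int (List Int)} {fresh : Int}
    (hinv : SimInv circles label members fresh) (u v : Int) :
    ((Acore circles u v).2 : Int) = (stageB label members fresh u v).2.2.2 ∧
      SimInv (Acore circles u v).1 (stageB label members fresh u v).1
        (stageB label members fresh u v).2.1 (stageB label members fresh u v).2.2.1 := by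
  by_cases hcu : label.contains u = true
  · have e1 : ensureB label members fresh u = (label, members, fresh) := ensureB_pos hcu
    obtain ⟨lu, hlu⟩ := get?_some_of_contains_true hcu
    by_cases hcv : label.contains v = true
    · obtain ⟨lv, hlv⟩ := get?_some_of_contains_true hcv
      have e2 : ensureB label members fresh v = (label, members, fresh) := ensureB_pos hcv
      have hst : stageB label members fresh u v =
          ((selB label members u v).1, (selB label members u v).2.1, fresh,
            (((selB label members u v).2.1.getD (selB label members u v).2.2 []).length : Int)) := by
        simp [stageB, e1, e2]
      obtain ⟨h1, h2⟩ := tailB hinv hlu hlv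
      rw [hst]
      exact ⟨by rw [h1], h2⟩
    · have hv0 : label.get? v = none := get?_none_of_contains_false (by simpa using hcv)
      have huv : u ≠ v := fun h => by rw [h, hv0] at hlu; cases hlu
      have hinv2 := phase_inv hinv hv0
      have hlu2 : (label.insert v fresh).get? u = some lu := by
        rw [PySem.Dict.get?_insert_of_ne _ _ huv]; exact hlu
      have hlv2 : (label.insert v fresh).get? v = some fresh :=
        PySem.Dict.get?_insert_self _ _ _
      have hAtr : Acore (circles ++ [[v]]) u v = Acore circles u v :=
        absorb_v (not_in_circle_of_none hinv hv0) u
      have e2 : ensureB label members fresh v =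
          (label.insert v fresh, members.insert fresh [v], fresh + 1) :=
        ensureB_neg (by simpa using hcv)
      have hst : stageB label members fresh u v =
          ((selB (label.insert v fresh) (members.insert fresh [v]) u v).1,
            (selB (label.insert v fresh) (members.insert fresh [v]) u v).2.1, fresh + 1,
            (((selB (label.insert v fresh) (members.insert fresh [v]) u v).2.1.getD
              (selB (label.insert v fresh) (members.insert fresh [v]) u v).2.2 []).length : Int)) := by
        simp [stageB, e1, e2]
      obtain ⟨h1, h2⟩ := tailB hinv2 hlu2 hlv2
      rw [hAtr] at h1 h2
      rw [hst]
      exact ⟨by rw [h1], h2⟩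
  · have hu0 : label.get? u = none := get?_none_of_contains_false (by simpa using hcu)
    have hinv1 := phase_inv hinv hu0
    have hAtr1 : Acore (circles ++ [[u]]) u v = Acore circles u v :=
      absorb_u (not_in_circle_of_none hinv hu0) v
    have e1 : ensureB label members fresh u =
        (label.insert u fresh, members.insert fresh [u], fresh + 1) :=
      ensureB_neg (by simpa using hcu)
    have hlu1 : (label.insert u fresh).get? u = some fresh :=
      PySem.Dict.get?_insert_self _ _ _
    by_cases hcv : (label.insert u fresh).contains v = true
    · obtain ⟨lv, hlv1⟩ := get?_some_of_contains_true hcv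
      have e2 : ensureB (label.insert u fresh) (members.insert fresh [u]) (fresh + 1) v =
          (label.insert u fresh, members.insert fresh [u], fresh + 1) := ensureB_pos hcv
      have hst : stageB label members fresh u v =
          ((selB (label.insert u fresh) (members.insert fresh [u]) u v).1,
            (selB (label.insert u fresh) (members.insert fresh [u]) u v).2.1, fresh + 1,
            (((selB (label.insert u fresh) (members.insert fresh [u]) u v).2.1.getD
              (selB (label.insert u fresh) (members.insert fresh [u]) u v).2.2 []).length : Int)) := by
        simp [stageB, e1, e2]
      obtain ⟨h1, h2⟩ := tailB hinv1 hlu1 hlv1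
      rw [hAtr1] at h1 h2
      rw [hst]
      exact ⟨by rw [h1], h2⟩
    · have hv1 : (label.insert u fresh).get? v = none :=
        get?_none_of_contains_false (by simpa using hcv)
      have huv : u ≠ v := fun h => by rw [← h, hlu1] at hv1; cases hv1
      have hinv2 := phase_inv hinv1 hv1
      have hlu2 : ((label.insert u fresh).insert v (fresh + 1)).get? u = some fresh := by
        rw [PySem.Dict.get?_insert_of_ne _ _ huv]; exact hlu1
      have hlv2 : ((label.insert u fresh).insert v (fresh + 1)).get? v = some (fresh + 1) :=
        PySem.Dict.get?_insert_self _ _ _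
      have hAtr2 : Acore ((circles ++ [[u]]) ++ [[v]]) u v = Acore (circles ++ [[u]]) u v :=
        absorb_v (not_in_circle_of_none hinv1 hv1) u
      have e2 : ensureB (label.insert u fresh) (members.insert fresh [u]) (fresh + 1) v =
          ((label.insert u fresh).insert v (fresh + 1),
            (members.insert fresh [u]).insert (fresh + 1) [v], fresh + 1 + 1) :=
        ensureB_neg (by simpa using hcv)
      have hst : stageB label members fresh u v =
          ((selB ((label.insert u fresh).insert v (fresh + 1))
              ((members.insert fresh [u]).insert (fresh + 1) [v]) u v).1,
            (selB ((label.insert u fresh).insert v (fresh + 1))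
              ((members.insert fresh [u]).insert (fresh + 1) [v]) u v).2.1, fresh + 1 + 1,
            (((selB ((label.insert u fresh).insert v (fresh + 1))
                ((members.insert fresh [u]).insert (fresh + 1) [v]) u v).2.1.getD
              (selB ((label.insert u fresh).insert v (fresh + 1))
                ((members.insert fresh [u]).insert (fresh + 1) [v]) u v).2.2 []).length : Int)) := by
        simp [stageB, e1, e2]
      obtain ⟨h1, h2⟩ := tailB hinv2 hlu2 hlv2
      rw [hAtr2, hAtr1] at h1 h2
      rw [hst]
      exact ⟨by rw [h1], h2⟩

theorem bestmax {biggest best : Int} (hb : biggest = best ∨ (biggest = -1 ∧ best = 0))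
    {n : Nat} (hn : 1 ≤ n) {m : Int} (hm : (n : Int) = m) :
    max biggest (n : Int) = if m > best then m else best := by
  subst hm
  rcases hb with rfl | ⟨rfl, rfl⟩ <;> split_ifs <;> omega

-- one query keeps the two sides in lockstep
theorem step_core {circles : List (List Int)} {label : PySem.Dict Int Int}
    {members : PySem.Dict Int (List Int)} {fresh : Int} {biggest best : Int}
    (hinv : SimInv circles label members fresh)
    (hb : biggest = best ∨ (biggest = -1 ∧ best = 0)) (ans : List Int) (q : List Int) :
    (stepA (ans, circles, biggest) q).1 = (stepB ⟨ans, label, members, fresh, best⟩ q).ans ∧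
    (stepA (ans, circles, biggest) q).2.2 = (stepB ⟨ans, label, members, fresh, best⟩ q).best ∧
    SimInv (stepA (ans, circles, biggest) q).2.1
      (stepB ⟨ans, label, members, fresh, best⟩ q).label
      (stepB ⟨ans, label, members, fresh, best⟩ q).members
      (stepB ⟨ans, label, members, fresh, best⟩ q).fresh := by
  obtain ⟨hsz, hinv'⟩ := stageB_spec hinv (PySem.List.pyGetD q 0 0) (PySem.List.pyGetD q 1 0)
  have hmax := bestmax hb (sz_pos circles (PySem.List.pyGetD q 0 0) (PySem.List.pyGetD q 1 0)) hsz
  rw [stepA_eq, stepB_eq]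
  exact ⟨by rw [hmax], by rw [hmax], hinv'⟩

theorem sim_foldl (qs : List (List Int)) (ans : List Int) (circles : List (List Int))
    (biggest : Int) (label : PySem.Dict Int Int) (members : PySem.Dict Int (List Int))
    (fresh best : Int) (hinv : SimInv circles label members fresh)
    (hb : biggest = best ∨ (biggest = -1 ∧ best = 0)) :
    (qs.foldl stepA (ans, circles, biggest)).1 =
      (qs.foldl stepB ⟨ans, label, members, fresh, best⟩).ans := by
  induction qs generalizing ans circles biggest label members fresh best with
  | nil => rfl
  | cons q qs ih =>
    obtain ⟨h1, h2, h3⟩ := step_core hinv hb ans q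
    simp only [List.foldl_cons]
    have hA : stepA (ans, circles, biggest) q =
        ((stepA (ans, circles, biggest) q).1, (stepA (ans, circles, biggest) q).2.1,
          (stepA (ans, circles, biggest) q).2.2) := rfl
    have hB : stepB ⟨ans, label, members, fresh, best⟩ q =
        ⟨(stepB ⟨ans, label, members, fresh, best⟩ q).ans,
          (stepB ⟨ans, label, members, fresh, best⟩ q).label,
          (stepB ⟨ans, label, members, fresh, best⟩ q).members,
          (stepB ⟨ans, label, members, fresh, best⟩ q).fresh,
          (stepB ⟨ans, label, members, fresh, best⟩ q).best⟩ := rfl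
    rw [hA, hB, h1, h2]
    exact ih _ _ _ _ _ _ _ h3 (Or.inl rfl)

-- ===== VERDICT (by name: the statement is the Claim_ definition above) =====
theorem maxCircle_spec : Claim_equal_maxCircle := by
  intro queries _ _
  show maxCircle queries = maxCircle_alt queries
  unfold maxCircle maxCircle_alt
  apply sim_foldl
  · constructor
    · exact List.Pairwise.nil
    · intro c hc; cases hc
    · simp [PySem.Dict.empty, PySem.Dict.keys]
    · intro x i h; simp [PySem.Dict.get?, PySem.Dict.empty] at h
    · intro i m h; simp [PySem.Dict.get?, PySem.Dict.empty] at h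
    · intro i h; simp [PySem.Dict.empty, PySem.Dict.keys] at h
    · intro x; simp [classA, classB, PySem.Dict.get?, PySem.Dict.empty]
  · exact Or.inr ⟨rfl, rfl⟩
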